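-- pv_equiv track=rewrite | github.com/prnv007-rgb/CareerKraft | app.py | merge_wordpieces
-- ===== SOURCE A (Python) =====
-- def merge_wordpieces(entities):
--     merged = []
--     buffer = ""
--     for entity in entities:
--         token = entity.get('word', '')
--         # If token starts with "##", append it to the current buffer.
--         if token.startswith("##"):
--             buffer += token[2:]
--         else:
--             if buffer:
--                 merged.append(buffer)
--                 buffer = ""
--             merged.append(token)
--     if buffer:
--         merged.append(buffer)
--     return merged
-- ===== SOURCE B (Python) =====
-- def merge_wordpieces(entities):
--     # Group-then-reduce: extract the word list, then consume maximal "##" runs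
--     # with an inner scan, joining their suffixes, instead of a buffer state machine.
--     words = [e.get('word', '') for e in entities]
--     out = []
--     i = 0
--     n = len(words)
--     while i < n:
--         if words[i].startswith("##"):
--             j = i
--             while j < n and words[j].startswith("##"):
--                 j += 1
--             piece = "".join(w[2:] for w in words[i:j])
--             if piece:
--                 out.append(piece)
--             i = j
--         else:
--             out.append(words[i])
--             i += 1
--     return out
-- ===== Notes on version B (the rewrite author's own statement) =====
-- stated objective: alternative
-- what changed: Replaces A's single-pass buffer state machine with a map to the word list followed by a group-then-reduce scan that consumes each maximal '##' run with an inner loop and joins its suffixes.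
import Mathlib
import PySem

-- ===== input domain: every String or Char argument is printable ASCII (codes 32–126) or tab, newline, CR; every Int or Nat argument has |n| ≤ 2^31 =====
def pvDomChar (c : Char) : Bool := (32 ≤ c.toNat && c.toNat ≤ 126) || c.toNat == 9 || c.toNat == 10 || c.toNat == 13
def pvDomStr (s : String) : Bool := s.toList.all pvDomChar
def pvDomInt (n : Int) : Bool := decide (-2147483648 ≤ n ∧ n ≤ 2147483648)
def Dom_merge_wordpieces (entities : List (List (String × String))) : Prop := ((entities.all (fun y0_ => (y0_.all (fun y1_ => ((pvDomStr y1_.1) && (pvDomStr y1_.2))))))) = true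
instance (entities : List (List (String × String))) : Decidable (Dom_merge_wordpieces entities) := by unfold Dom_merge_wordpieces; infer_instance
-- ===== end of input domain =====

-- B replaces A's buffer state machine with a group-then-reduce scan over maximal "##" runs (alternative, equal cost); return value only.

-- ===== PORT A =====
-- entity.get('word','')
def pvWord (entity : List (String × String)) : String :=
  PySem.Dict.getD (PySem.Dict.mk entity) "word" ""

-- the loop body: state is (merged, buffer)
def pvStepA (st : List String × String) (entity : List (String × String)) : List String × String :=
  let token := pvWord entity
  if PySem.Str.startswith token "##" then
    (st.1, st.2 ++ PySem.Str.slice token (some 2) none)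
  else
    if st.2 ≠ "" then (st.1 ++ [st.2, token], "") else (st.1 ++ [token], "")

def merge_wordpieces (entities : List (List (String × String))) : List String :=
  let r := entities.foldl pvStepA ([], "")
  if r.2 ≠ "" then r.1 ++ [r.2] else r.1

-- ===== PORT B =====
-- token[2:]
def pvSuf (t : String) : String := PySem.Str.slice t (some 2) none

-- inner while loop of B: join the suffixes of the leading "##" run, return the rest
def pvCollectRun : List String → String × List String
  | [] => ("", [])
  | w :: ws =>
    if PySem.Str.startswith w "##" then
      let p := pvCollectRun ws
      (pvSuf w ++ p.1, p.2)
    else ("", w :: ws)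

theorem pvCollectRun_len (ws : List String) : (pvCollectRun ws).2.length ≤ ws.length := by
  induction ws with
  | nil => simp [pvCollectRun]
  | cons w ws ih =>
    simp only [pvCollectRun]
    split
    · exact Nat.le_succ_of_le ih
    · simp

-- outer while loop of B over the word list
def pvMergeRuns : List String → List String
  | [] => []
  | w :: ws =>
    if PySem.Str.startswith w "##" then
      let p := pvCollectRun ws
      let piece := pvSuf w ++ p.1
      (if piece ≠ "" then [piece] else []) ++ pvMergeRuns p.2
    else w :: pvMergeRuns ws
termination_by l => l.length
decreasing_by
  · exact Nat.lt_succ_of_le (pvCollectRun_len ws)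
  · simp

def merge_wordpieces_alt (entities : List (List (String × String))) : List String :=
  pvMergeRuns (entities.map pvWord)

-- ===== PRECONDITION & SPEC =====
def Spec_merge_wordpieces (entities : List (List (String × String))) (out : List String) : Prop := out = merge_wordpieces_alt entities
instance (entities : List (List (String × String))) (out : List String) : Decidable (Spec_merge_wordpieces entities out) := by unfold Spec_merge_wordpieces; infer_instance

-- ===== CLAIM (what is proved, stated in full; the proofs are below) =====
def Claim_equal_merge_wordpieces : Prop := ∀ (entities : List (List (String × String))), Dom_merge_wordpieces entities → Spec_merge_wordpieces entities (merge_wordpieces entities)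

-- ===== LEMMAS AND PROOFS =====

-- A's loop body, on the bare token
def pvStepTok (st : List String × String) (token : String) : List String × String :=
  if PySem.Str.startswith token "##" then
    (st.1, st.2 ++ pvSuf token)
  else
    if st.2 ≠ "" then (st.1 ++ [st.2, token], "") else (st.1 ++ [token], "")

-- A's final flush
def pvFinish (r : List String × String) : List String :=
  if r.2 ≠ "" then r.1 ++ [r.2] else r.1

theorem pvMergeRuns_collect (ws : List String) :
    pvMergeRuns ws =
      (if (pvCollectRun ws).1 ≠ "" then [(pvCollectRun ws).1] else []) ++
        pvMergeRuns (pvCollectRun ws).2 := by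
  cases ws with
  | nil => simp [pvCollectRun, pvMergeRuns]
  | cons w ws =>
    by_cases h : PySem.Chars.startswith w.toList ['#', '#'] = true
    · rw [pvMergeRuns, pvCollectRun]
      simp [h]
    · rw [pvMergeRuns, pvCollectRun]
      simp [h, pvMergeRuns]

theorem pvFold_eq (ws : List String) : ∀ (m : List String) (b : String),
    pvFinish (ws.foldl pvStepTok (m, b)) =
      m ++ (if b ++ (pvCollectRun ws).1 ≠ "" then [b ++ (pvCollectRun ws).1] else []) ++
        pvMergeRuns (pvCollectRun ws).2 := by
  induction ws with
  | nil =>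
    intro m b
    simp [pvCollectRun, pvMergeRuns, pvFinish]
    split <;> simp
  | cons w ws ih =>
    intro m b
    by_cases h : PySem.Str.startswith w "##" = true
    · have := ih m (b ++ pvSuf w)
      rw [List.foldl_cons, pvStepTok, if_pos h, pvCollectRun, if_pos h]
      simpa [String.append_assoc] using this
    · rw [List.foldl_cons, pvStepTok, if_neg h, pvCollectRun, if_neg h]
      by_cases hb : b = ""
      all_goals
        have hm : pvMergeRuns (w :: ws) = w :: pvMergeRuns ws := by
          rw [pvMergeRuns, if_neg h]
      · subst hb
        rw [if_neg (by simp)]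
        rw [ih (m ++ [w]) ""]
        simp [hm, pvMergeRuns_collect ws]
      · rw [if_pos hb]
        rw [ih (m ++ [b, w]) ""]
        simp [hb, hm, pvMergeRuns_collect ws]

-- ===== VERDICT (by name: the statement is the Claim_ definition above) =====
theorem merge_wordpieces_spec : Claim_equal_merge_wordpieces := by
  intro entities _
  unfold Spec_merge_wordpieces merge_wordpieces merge_wordpieces_alt
  show pvFinish (entities.foldl pvStepA ([], "")) = _
  have hfold : entities.foldl pvStepA ([], "") =
      (entities.map pvWord).foldl pvStepTok ([], "") := by
    rw [List.foldl_map]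
    rfl
  rw [hfold, pvFold_eq (entities.map pvWord) [] ""]
  rw [pvMergeRuns_collect (entities.map pvWord)]
  simp
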